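-- pv_equiv track=rewrite | github.com/xSpecialFoodx/Fast-Extremums-Finder | equations_solver.py | BeautifyEquationText
-- ===== SOURCE A (Python) =====
-- def BeautifyEquationText(EquationText: str) -> str:
--     """
--     Description:
--
--         Beautifies the equation text
--
--     Parameters:
--
--         EquationText: the equation as a string (for example: "x^2 + 3x + 2")
--
--     Returns:
--
--         Returns the beautified equation text
--     """
--
--     # Function Variables
--
--     FunctionResult = None
--
--     SymbolsList = "+-*/^"
--
--     BeautifiedEquationText = ' '.join(EquationText.split())
--     BeautifiedEquationTextLength = len(BeautifiedEquationText)
--     BeautifiedEquationTextIndex = None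
--
--     # Start
--
--     if BeautifiedEquationTextLength > 2:
--         BeautifiedEquationTextIndex = 1
--
--         while BeautifiedEquationTextIndex < BeautifiedEquationTextLength - 1:
--             if (BeautifiedEquationText[BeautifiedEquationTextIndex] in SymbolsList) is True:
--                 if (
--                     (BeautifiedEquationText[BeautifiedEquationTextIndex - 1] in SymbolsList) is False
--                     and BeautifiedEquationText[BeautifiedEquationTextIndex - 1] != ' '
--                 ):
--                     BeautifiedEquationText = (
--                         BeautifiedEquationText[:BeautifiedEquationTextIndex]
--                         + ' '
--                         + BeautifiedEquationText[BeautifiedEquationTextIndex:]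
--                     )
--
--                     BeautifiedEquationTextLength += 1
--                     BeautifiedEquationTextIndex += 1
--
--                 if (
--                     (BeautifiedEquationText[BeautifiedEquationTextIndex + 1] in SymbolsList) is False
--                     and BeautifiedEquationText[BeautifiedEquationTextIndex + 1] != ' '
--                 ):
--                     BeautifiedEquationText = (
--                         BeautifiedEquationText[:BeautifiedEquationTextIndex + 1]
--                         + ' '
--                         + BeautifiedEquationText[BeautifiedEquationTextIndex + 1:]
--                     )
--
--                     BeautifiedEquationTextLength += 1
--
--             BeautifiedEquationTextIndex += 1
--
--     FunctionResult = BeautifiedEquationText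
--
--     return FunctionResult
-- ===== SOURCE B (Python) =====
-- def BeautifyEquationText(EquationText: str) -> str:
--     """One pass over the normalized text: each operator char (away from the
--     ends) gets a space emitted beside it when its original neighbour on that
--     side is neither a space nor another operator."""
--     s = ' '.join(EquationText.split())
--     n = len(s)
--     ops = "+-*/^"
--     parts = []
--     for j, c in enumerate(s):
--         if c in ops and 0 < j < n - 1:
--             if s[j - 1] not in ops and s[j - 1] != ' ':
--                 parts.append(' ')
--             parts.append(c)
--             if s[j + 1] not in ops and s[j + 1] != ' ':
--                 parts.append(' ')
--         else:
--             parts.append(c)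
--     return ''.join(parts)
-- ===== Notes on version B (the rewrite author's own statement) =====
-- stated objective: faster
-- what changed: A repeatedly re-slices the growing string and shifts its index to insert spaces in place; B makes one position-local pass over the normalized text, deciding from the original neighbours of each operator which spaces to emit, and joins the pieces once.
import Mathlib
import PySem

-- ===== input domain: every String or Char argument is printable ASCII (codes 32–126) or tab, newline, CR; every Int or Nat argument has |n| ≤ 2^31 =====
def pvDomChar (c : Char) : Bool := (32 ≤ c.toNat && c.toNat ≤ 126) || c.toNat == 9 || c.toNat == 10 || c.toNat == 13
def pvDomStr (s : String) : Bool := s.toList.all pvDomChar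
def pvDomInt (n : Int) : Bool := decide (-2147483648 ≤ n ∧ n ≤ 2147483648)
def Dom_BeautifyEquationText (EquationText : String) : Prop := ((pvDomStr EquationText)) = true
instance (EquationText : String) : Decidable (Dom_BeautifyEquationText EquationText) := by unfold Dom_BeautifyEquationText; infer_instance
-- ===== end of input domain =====

-- B replaces A's in-place insertion loop (which re-slices the growing string and shifts
-- its index) by a single position-local pass over the normalized text.

-- ===== PORT A =====
-- SymbolsList = "+-*/^"
def pvSymbolsA : List Char := ['+', '-', '*', '/', '^']

-- the while-loop of A: state (current text, current index); one recursive call per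
-- iteration. Slices s[:i] / s[i:] with 0 ≤ i ≤ len(s) are List.take / List.drop
-- (exact there); in-range s[i] is List.getD. The fuel argument only makes the
-- recursion structural; pvLoopA_inv below shows the initial fuel 2 * len(text) is
-- never exhausted, so the recursion is exactly the Python loop.
def pvLoopA : Nat → List Char → Nat → List Char
  | 0, cur, _ => cur
  | fuel + 1, cur, idx =>
    if idx < cur.length - 1 then
      if cur.getD idx ' ' ∈ pvSymbolsA then
        if cur.getD (idx - 1) ' ' ∉ pvSymbolsA ∧ cur.getD (idx - 1) ' ' ≠ ' ' then
          -- insert ' ' before the operator; Length += 1; Index += 1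
          if (cur.take idx ++ ' ' :: cur.drop idx).getD ((idx + 1) + 1) ' ' ∉ pvSymbolsA ∧
              (cur.take idx ++ ' ' :: cur.drop idx).getD ((idx + 1) + 1) ' ' ≠ ' ' then
            pvLoopA fuel ((cur.take idx ++ ' ' :: cur.drop idx).take (idx + 2) ++
              ' ' :: (cur.take idx ++ ' ' :: cur.drop idx).drop (idx + 2)) (idx + 2)
          else
            pvLoopA fuel (cur.take idx ++ ' ' :: cur.drop idx) (idx + 2)
        else
          if cur.getD (idx + 1) ' ' ∉ pvSymbolsA ∧ cur.getD (idx + 1) ' ' ≠ ' ' then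
            pvLoopA fuel (cur.take (idx + 1) ++ ' ' :: cur.drop (idx + 1)) (idx + 1)
          else
            pvLoopA fuel cur (idx + 1)
      else
        pvLoopA fuel cur (idx + 1)
    else cur

def BeautifyEquationText (EquationText : String) : String :=
  -- BeautifiedEquationText = ' '.join(EquationText.split())
  let t := PySem.Chars.join [' '] (PySem.Chars.split₀ EquationText.toList)
  if t.length > 2 then String.ofList (pvLoopA (2 * t.length) t 1) else String.ofList t

-- ===== PORT B =====
-- ops = "+-*/^"
def pvOpsB : List Char := ['+', '-', '*', '/', '^']

def BeautifyEquationText_alt (EquationText : String) : String :=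
  let s := PySem.Chars.join [' '] (PySem.Chars.split₀ EquationText.toList)
  let n := s.length
  -- for j, c in enumerate(s): collect the pieces in order; ''.join(parts) = flatMap
  String.ofList ((PySem.List.enumerate s).flatMap (fun p =>
    if p.2 ∈ pvOpsB ∧ 0 < p.1 ∧ p.1 < (n : Int) - 1 then
      (if PySem.List.pyGetD s (p.1 - 1) ' ' ∉ pvOpsB ∧ PySem.List.pyGetD s (p.1 - 1) ' ' ≠ ' '
        then [' '] else []) ++
      p.2 ::
      (if PySem.List.pyGetD s (p.1 + 1) ' ' ∉ pvOpsB ∧ PySem.List.pyGetD s (p.1 + 1) ' ' ≠ ' '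
        then [' '] else [])
    else [p.2]))

-- ===== PRECONDITION & SPEC =====
def Spec_BeautifyEquationText (EquationText : String) (out : String) : Prop := out = BeautifyEquationText_alt EquationText
instance (EquationText : String) (out : String) : Decidable (Spec_BeautifyEquationText EquationText out) := by unfold Spec_BeautifyEquationText; infer_instance

-- ===== CLAIM (what is proved, stated in full; the proofs are below) =====
def Claim_equal_BeautifyEquationText : Prop := ∀ (EquationText : String), Dom_BeautifyEquationText EquationText → Spec_BeautifyEquationText EquationText (BeautifyEquationText EquationText)

-- ===== LEMMAS AND PROOFS =====

theorem pvGd_mid (X Y : List Char) (c d : Char) (n : Nat) (h : X.length = n) :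
    (X ++ c :: Y).getD n d = c := by
  subst h; simp [List.getD_eq_getElem?_getD]

-- pvEmit t j is what B emits for position j of the normalized text t
def pvEmit (t : List Char) (j : Nat) : List Char :=
  if t.getD j ' ' ∈ pvOpsB ∧ 1 ≤ j ∧ j + 1 < t.length then
    (if t.getD (j - 1) ' ' ∉ pvOpsB ∧ t.getD (j - 1) ' ' ≠ ' ' then [' '] else []) ++
    t.getD j ' ' ::
    (if t.getD (j + 1) ' ' ∉ pvOpsB ∧ t.getD (j + 1) ' ' ≠ ' ' then [' '] else [])
  else [t.getD j ' ']
def pvFlat (t : List Char) (j : Nat) : List Char := (List.range j).flatMap (pvEmit t)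

theorem pvOps_eq : pvOpsB = pvSymbolsA := rfl

theorem pvFlat_succ (t : List Char) (j : Nat) :
    pvFlat t (j + 1) = pvFlat t j ++ pvEmit t j := by
  simp [pvFlat, List.range_succ]

theorem pvEmit_concat (t : List Char) (i : Nat) (h : t.getD (i + 1) ' ' ∈ pvOpsB) :
    ∃ Z, pvEmit t i = Z ++ [t.getD i ' '] := by
  unfold pvEmit
  split
  · rw [if_neg (show ¬(t.getD (i + 1) ' ' ∉ pvOpsB ∧ t.getD (i + 1) ' ' ≠ ' ') from
        fun hc => hc.1 h)]
    split
    · exact ⟨[' '], rfl⟩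
    · exact ⟨[], rfl⟩
  · exact ⟨[], rfl⟩

theorem pvDrop_cons (t : List Char) (j : Nat) (h : j < t.length) :
    t.drop j = t.getD j ' ' :: t.drop (j + 1) := by
  rw [List.drop_eq_getElem_cons h, List.getD_eq_getElem?_getD, List.getElem?_eq_getElem h]
  rfl

theorem pvGd_drop (t : List Char) (j k : Nat) (d : Char) :
    (t.drop j).getD k d = t.getD (j + k) d := by
  simp [List.getD_eq_getElem?_getD, List.getElem?_drop]

theorem pvFlat_last (t : List Char) (j : Nat) (h1 : 1 ≤ j)
    (hop : t.getD j ' ' ∈ pvOpsB) :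
    (pvFlat t j).getD ((pvFlat t j).length - 1) ' ' = t.getD (j - 1) ' ' := by
  obtain ⟨i, rfl⟩ : ∃ i, j = i + 1 := ⟨j - 1, by omega⟩
  obtain ⟨Z, hZ⟩ := pvEmit_concat t i (by simpa using hop)
  rw [pvFlat_succ, hZ, ← List.append_assoc]
  rw [show pvFlat t i ++ Z ++ [t.getD i ' '] = (pvFlat t i ++ Z) ++ t.getD i ' ' :: [] from rfl]
  rw [pvGd_mid _ _ _ _ _ (by simp)]
  simp

theorem pvEmit_ne_nil (t : List Char) (j : Nat) : pvEmit t j ≠ [] := by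
  unfold pvEmit
  split
  · simp
  · simp

theorem pvFlat_len_pos (t : List Char) (j : Nat) (h : 1 ≤ j) :
    1 ≤ (pvFlat t j).length := by
  obtain ⟨i, rfl⟩ : ∃ i, j = i + 1 := ⟨j - 1, by omega⟩
  rw [pvFlat_succ, List.length_append]
  have := List.length_pos_of_ne_nil (pvEmit_ne_nil t i)
  omega

theorem pvLoopA_inv (t : List Char) (j fuel : Nat) (h1 : 1 ≤ j) (h2 : j ≤ t.length - 1)
    (h3 : 2 < t.length) (hf : 2 * (t.length - j) + 1 ≤ fuel) :
    pvLoopA fuel (pvFlat t j ++ t.drop j) (pvFlat t j).length = pvFlat t t.length := by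
  obtain ⟨k, hk⟩ : ∃ k, t.length - 1 - j = k := ⟨_, rfl⟩
  induction k generalizing j fuel with
  | zero =>
    have hj : j = t.length - 1 := by omega
    subst hj
    have hcur : pvFlat t (t.length - 1) ++ t.drop (t.length - 1) = pvFlat t t.length := by
      have hn : t.length = (t.length - 1) + 1 := by omega
      rw [hn, pvFlat_succ, ← hn]
      congr 1
      · rw [pvDrop_cons t (t.length - 1) (by omega)]
        unfold pvEmit
        rw [if_neg (by omega)]
        congr 1
        have : t.length - 1 + 1 = t.length := by omega
        rw [this, List.drop_length]
    cases fuel with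
    | zero => exact hcur
    | succ f =>
      rw [pvLoopA, if_neg (by
        simp only [List.length_append, List.length_drop]
        omega)]
      exact hcur
  | succ k ih =>
    have hj : j < t.length - 1 := by omega
    have hjn : j < t.length := by omega
    obtain ⟨f, rfl⟩ : ∃ f, fuel = f + 1 := ⟨fuel - 1, by omega⟩
    obtain ⟨f', rfl⟩ : ∃ f', f = f' + 1 := ⟨f - 1, by omega⟩
    have hL1 : 1 ≤ (pvFlat t j).length := pvFlat_len_pos t j h1
    have hcj : (pvFlat t j ++ t.drop j).getD (pvFlat t j).length ' ' = t.getD j ' ' := by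
      rw [List.getD_append_right _ _ _ _ (le_refl _), Nat.sub_self, pvGd_drop]
      rfl
    rw [pvLoopA, if_pos (by
      simp only [List.length_append, List.length_drop]; omega)]
    simp only [hcj]
    by_cases hop : t.getD j ' ' ∈ pvSymbolsA
    · have hopB : t.getD j ' ' ∈ pvOpsB := hop
      have hbj : (pvFlat t j ++ t.drop j).getD ((pvFlat t j).length - 1) ' ' = t.getD (j - 1) ' ' := by
        rw [List.getD_append _ _ _ _ (by omega)]
        exact pvFlat_last t j h1 hopB
      have htake : (pvFlat t j ++ t.drop j).take (pvFlat t j).length = pvFlat t j :=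
        List.take_left
      have hdrop : (pvFlat t j ++ t.drop j).drop (pvFlat t j).length = t.drop j :=
        List.drop_left
      have hcur1 : pvFlat t j ++ ' ' :: t.drop j = (pvFlat t j ++ [' ']) ++ t.drop j := by simp
      have hEmitCond' : (t.getD j ' ' ∈ pvSymbolsA ∧ 1 ≤ j ∧ j + 1 < t.length) := ⟨hop, h1, by omega⟩
      rw [if_pos hop]
      simp only [hbj, htake, hdrop]
      by_cases hbp : t.getD (j - 1) ' ' ∉ pvSymbolsA ∧ t.getD (j - 1) ' ' ≠ ' '
      · rw [if_pos hbp]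
        have hha : (pvFlat t j ++ ' ' :: t.drop j).getD ((pvFlat t j).length + 1 + 1) ' '
            = t.getD (j + 1) ' ' := by
          rw [hcur1, List.getD_append_right _ _ _ _ (by simp), pvGd_drop]
          congr 1
          simp
        simp only [hha]
        by_cases hap : t.getD (j + 1) ' ' ∉ pvSymbolsA ∧ t.getD (j + 1) ' ' ≠ ' '
        · rw [if_pos hap]
          have hE : pvEmit t j = [' ', t.getD j ' ', ' '] := by
            unfold pvEmit
            rw [pvOps_eq]
            rw [if_pos hEmitCond', if_pos hbp, if_pos hap]
            rfl
          have hc1 : pvFlat t j ++ ' ' :: t.drop j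
              = (pvFlat t j ++ [' ', t.getD j ' ']) ++ t.drop (j + 1) := by
            rw [pvDrop_cons t j hjn]; simp
          rw [hc1, List.take_left' (by simp), List.drop_left' (by simp)]
          rw [pvLoopA, if_pos (by
            simp only [List.length_append, List.length_cons, List.length_drop]
            omega)]
          have hsp := pvGd_mid (pvFlat t j ++ [' ', t.getD j ' ']) (t.drop (j + 1)) ' ' ' '
            ((pvFlat t j).length + 1 + 1) (by simp)
          simp only [hsp]
          rw [if_neg (by decide)]
          have hfin : (pvFlat t j ++ [' ', t.getD j ' ']) ++ ' ' :: t.drop (j + 1)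
              = pvFlat t (j + 1) ++ t.drop (j + 1) := by
            rw [pvFlat_succ, hE]; simp
          have hlen : (pvFlat t (j + 1)).length = (pvFlat t j).length + 3 := by
            rw [pvFlat_succ, hE]; simp
          rw [hfin, show (pvFlat t j).length + 1 + 1 + 1 = (pvFlat t (j + 1)).length from by
            rw [hlen]]
          exact ih (j + 1) _ (by omega) (by omega) (by omega) (by omega)
        · rw [if_neg hap]
          have hE : pvEmit t j = [' ', t.getD j ' '] := by
            unfold pvEmit
            rw [pvOps_eq]
            rw [if_pos hEmitCond', if_pos hbp, if_neg hap]
            rfl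
          have hfin : pvFlat t j ++ ' ' :: t.drop j = pvFlat t (j + 1) ++ t.drop (j + 1) := by
            rw [pvFlat_succ, hE, pvDrop_cons t j hjn]; simp
          have hlen : (pvFlat t (j + 1)).length = (pvFlat t j).length + 2 := by
            rw [pvFlat_succ, hE]; simp
          rw [hfin, show (pvFlat t j).length + 1 + 1 = (pvFlat t (j + 1)).length from by
            rw [hlen]]
          exact ih (j + 1) _ (by omega) (by omega) (by omega) (by omega)
      · rw [if_neg hbp]
        have hha : (pvFlat t j ++ t.drop j).getD ((pvFlat t j).length + 1) ' '
            = t.getD (j + 1) ' ' := by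
          rw [List.getD_append_right _ _ _ _ (by omega), pvGd_drop]
          congr 1
          omega
        simp only [hha]
        by_cases hap : t.getD (j + 1) ' ' ∉ pvSymbolsA ∧ t.getD (j + 1) ' ' ≠ ' '
        · rw [if_pos hap]
          have hE : pvEmit t j = [t.getD j ' ', ' '] := by
            unfold pvEmit
            rw [pvOps_eq]
            rw [if_pos hEmitCond', if_neg hbp, if_pos hap]
            rfl
          have hc1 : pvFlat t j ++ t.drop j
              = (pvFlat t j ++ [t.getD j ' ']) ++ t.drop (j + 1) := by
            rw [pvDrop_cons t j hjn]; simp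
          rw [hc1, List.take_left' (by simp), List.drop_left' (by simp)]
          rw [pvLoopA, if_pos (by
            simp only [List.length_append, List.length_cons, List.length_drop]
            omega)]
          have hsp := pvGd_mid (pvFlat t j ++ [t.getD j ' ']) (t.drop (j + 1)) ' ' ' '
            ((pvFlat t j).length + 1) (by simp)
          simp only [hsp]
          rw [if_neg (by decide)]
          have hfin : (pvFlat t j ++ [t.getD j ' ']) ++ ' ' :: t.drop (j + 1)
              = pvFlat t (j + 1) ++ t.drop (j + 1) := by
            rw [pvFlat_succ, hE]; simp
          have hlen : (pvFlat t (j + 1)).length = (pvFlat t j).length + 2 := by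
            rw [pvFlat_succ, hE]; simp
          rw [hfin, show (pvFlat t j).length + 1 + 1 = (pvFlat t (j + 1)).length from by
            rw [hlen]]
          exact ih (j + 1) _ (by omega) (by omega) (by omega) (by omega)
        · rw [if_neg hap]
          have hE : pvEmit t j = [t.getD j ' '] := by
            unfold pvEmit
            rw [pvOps_eq]
            rw [if_pos hEmitCond', if_neg hbp, if_neg hap]
            rfl
          have hfin : pvFlat t j ++ t.drop j = pvFlat t (j + 1) ++ t.drop (j + 1) := by
            rw [pvFlat_succ, hE, pvDrop_cons t j hjn]; simp
          have hlen : (pvFlat t (j + 1)).length = (pvFlat t j).length + 1 := by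
            rw [pvFlat_succ, hE]; simp
          rw [hfin, show (pvFlat t j).length + 1 = (pvFlat t (j + 1)).length from by
            rw [hlen]]
          exact ih (j + 1) _ (by omega) (by omega) (by omega) (by omega)
    · rw [if_neg hop]
      have hcur : pvFlat t j ++ t.drop j = pvFlat t (j + 1) ++ t.drop (j + 1) := by
        rw [pvFlat_succ]
        have hE : pvEmit t j = [t.getD j ' '] := by
          unfold pvEmit
          rw [if_neg (fun hc => hop hc.1)]
        rw [hE, pvDrop_cons t j hjn]
        simp
      have hlen : (pvFlat t (j + 1)).length = (pvFlat t j).length + 1 := by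
        rw [pvFlat_succ]
        have hE : pvEmit t j = [t.getD j ' '] := by
          unfold pvEmit
          rw [if_neg (fun hc => hop hc.1)]
        simp [hE]
      rw [hcur, ← hlen]
      exact ih (j + 1) _ (by omega) (by omega) (by omega) (by omega)

theorem pvFlat_small (t : List Char) (h : t.length ≤ 2) : pvFlat t t.length = t := by
  unfold pvFlat
  have hE : ∀ j ∈ List.range t.length, pvEmit t j = [t.getD j ' '] := by
    intro j hj
    rw [List.mem_range] at hj
    unfold pvEmit
    rw [if_neg (fun hc => absurd hc.2 (by omega))]
  rw [List.flatMap_congr hE, ← List.map_eq_flatMap]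
  apply List.ext_getElem
  · simp
  · intro i h1 h2
    simp [List.getD_eq_getElem?_getD, List.getElem?_eq_getElem h2]

theorem pvB_flat (s : List Char) :
    (PySem.List.enumerate s).flatMap (fun p =>
      if p.2 ∈ pvOpsB ∧ 0 < p.1 ∧ p.1 < (s.length : Int) - 1 then
        (if PySem.List.pyGetD s (p.1 - 1) ' ' ∉ pvOpsB ∧ PySem.List.pyGetD s (p.1 - 1) ' ' ≠ ' '
          then [' '] else []) ++
        p.2 ::
        (if PySem.List.pyGetD s (p.1 + 1) ' ' ∉ pvOpsB ∧ PySem.List.pyGetD s (p.1 + 1) ' ' ≠ ' '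
          then [' '] else [])
      else [p.2]) = pvFlat s s.length := by
  rw [PySem.List.enumerate_eq_map_pyRange s ' ', PySem.List.len]
  rw [PySem.List.pyRange_zero_natCast, List.map_map, List.flatMap_map]
  unfold pvFlat
  apply List.flatMap_congr
  simp only [List.mem_range]
  intro j hj
  simp only [Function.comp]
  rw [PySem.List.pyGetD_natCast]
  unfold pvEmit
  have hc1 : (0 < (j:Int) ∧ (j:Int) < (s.length : Int) - 1) ↔ (1 ≤ j ∧ j + 1 < s.length) := by
    constructor <;> (intro h; constructor <;> omega)
  by_cases hb : s.getD j ' ' ∈ pvOpsB ∧ 1 ≤ j ∧ j + 1 < s.length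
  · rw [if_pos hb, if_pos ⟨hb.1, hc1.mpr hb.2⟩]
    obtain ⟨-, h1, -⟩ := hb
    have e1 : (j:Int) - 1 = ((j-1 : Nat) : Int) := by omega
    have e2 : (j:Int) + 1 = ((j+1 : Nat) : Int) := by push_cast; ring
    simp only [e1, e2, PySem.List.pyGetD_natCast]
  · rw [if_neg hb, if_neg (fun h => hb ⟨h.1, hc1.mp h.2⟩)]

-- ===== VERDICT (by name: the statement is the Claim_ definition above) =====
theorem BeautifyEquationText_spec : Claim_equal_BeautifyEquationText := by
  intro s _
  unfold Spec_BeautifyEquationText BeautifyEquationText BeautifyEquationText_alt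
  dsimp only
  rw [pvB_flat]
  by_cases h : 2 < (PySem.Chars.join [' '] (PySem.Chars.split₀ s.toList)).length
  · rw [if_pos h]
    congr 1
    have h10 : pvFlat (PySem.Chars.join [' '] (PySem.Chars.split₀ s.toList)) 1
        = [(PySem.Chars.join [' '] (PySem.Chars.split₀ s.toList)).getD 0 ' '] := by
      simp [pvFlat, pvEmit]
    have ht : PySem.Chars.join [' '] (PySem.Chars.split₀ s.toList)
        = pvFlat (PySem.Chars.join [' '] (PySem.Chars.split₀ s.toList)) 1
          ++ (PySem.Chars.join [' '] (PySem.Chars.split₀ s.toList)).drop 1 := by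
      rw [h10]
      have := pvDrop_cons (PySem.Chars.join [' '] (PySem.Chars.split₀ s.toList)) 0 (by omega)
      simpa using this
    calc pvLoopA (2 * (PySem.Chars.join [' '] (PySem.Chars.split₀ s.toList)).length)
          (PySem.Chars.join [' '] (PySem.Chars.split₀ s.toList)) 1
        = pvLoopA (2 * (PySem.Chars.join [' '] (PySem.Chars.split₀ s.toList)).length)
            (pvFlat (PySem.Chars.join [' '] (PySem.Chars.split₀ s.toList)) 1
            ++ (PySem.Chars.join [' '] (PySem.Chars.split₀ s.toList)).drop 1)
            (pvFlat (PySem.Chars.join [' '] (PySem.Chars.split₀ s.toList)) 1).length := by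
          rw [← ht, h10, List.length_singleton]
      _ = _ := pvLoopA_inv _ 1 _ (le_refl 1) (by omega) h (by omega)
  · rw [if_neg h]
    rw [pvFlat_small _ (by omega)]
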